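-- pv_equiv track=rewrite | github.com/thirtysix/TFBS_footprinting3 | tfbs_footprinter3/alignment.py | remove_non_ACGT
-- ===== SOURCE A (Python) =====
-- def remove_non_ACGT(alignment):
--     """
--     Remove non alignment characters and ambiguous nucleotides.  should consider changing to replacing any non ACGT char to '-'.
--     """
--
--     # account for sequences which are non-standard code
--     non_standard_dict = {'R': ['A', 'G'],
--                          'Y': ['C', 'T'],
--                          'S': ['G', 'C'],
--                          'W': ['A', 'T'],
--                          'K': ['G', 'T'],
--                          'M': ['A', 'C'],
--                          'B': ['C', 'G', 'T'],
--                          'D': ['A', 'G', 'T'],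
--                          'H': ['A', 'C', 'T'],
--                          'V': ['A', 'C', 'G']}
--
--     non_alignment_chars = " .N"
--     for entry in alignment:
--         for non_alignment_char in non_alignment_chars:
--             entry['seq'] = entry['seq'].replace(non_alignment_char, '-')
--
--         for multi_char, replacement_list in non_standard_dict.items():
--             entry['seq'] = entry['seq'].replace(non_alignment_char, replacement_list[0])
--
--     return alignment
-- ===== SOURCE B (Python) =====
-- # Simpler: one table-driven translate pass per sequence instead of 13 repeated
-- # .replace scans (the second loop of A is inert); mutates the dicts in place
-- # and returns the same alignment object, like A.
-- _TBL = str.maketrans(" .N", "---")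
--
--
-- def remove_non_ACGT(alignment):
--     """
--     Remove non alignment characters and ambiguous nucleotides.
--     """
--     for entry in alignment:
--         entry['seq'] = entry['seq'].translate(_TBL)
--     return alignment
-- ===== Notes on version B (the rewrite author's own statement) =====
-- stated objective: simpler
-- what changed: One str.maketrans/translate table pass per sequence replaces A's 13 successive str.replace scans (A's second loop only re-replaces the leftover loop variable 'N', already gone, so it is inert); B mutates the entry dicts in place and returns the same alignment object, like A.
-- outside the precondition, e.g. on remove_non_ACGT([{'x': 'y'}]): A raises KeyError, B raises KeyError
import Mathlib
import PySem

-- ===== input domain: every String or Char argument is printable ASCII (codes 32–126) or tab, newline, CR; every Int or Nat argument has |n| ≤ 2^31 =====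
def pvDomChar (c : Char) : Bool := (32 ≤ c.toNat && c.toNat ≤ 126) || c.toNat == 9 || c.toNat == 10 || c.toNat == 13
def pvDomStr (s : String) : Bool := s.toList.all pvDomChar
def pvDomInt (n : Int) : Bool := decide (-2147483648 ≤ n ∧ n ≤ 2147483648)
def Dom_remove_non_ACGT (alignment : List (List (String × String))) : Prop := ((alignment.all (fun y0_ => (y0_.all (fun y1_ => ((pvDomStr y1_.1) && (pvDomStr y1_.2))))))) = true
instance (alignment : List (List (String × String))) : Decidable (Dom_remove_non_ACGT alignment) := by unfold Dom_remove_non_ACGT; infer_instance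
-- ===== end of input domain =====

-- B replaces A's 13 repeated .replace scans (the second loop is inert) with one
-- table-driven translate pass per sequence; equivalence is about the return value
-- (both Pythons also mutate the entry dicts in place, identically).


-- ===== PORT A =====
-- non_standard_dict as an items list (iteration order = insertion order)
def pvNonStandardItems : List (String × List String) :=
  [("R", ["A", "G"]), ("Y", ["C", "T"]), ("S", ["G", "C"]), ("W", ["A", "T"]),
   ("K", ["G", "T"]), ("M", ["A", "C"]), ("B", ["C", "G", "T"]), ("D", ["A", "G", "T"]),
   ("H", ["A", "C", "T"]), ("V", ["A", "C", "G"])]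

-- body of A's 'for entry in alignment' loop; entry['seq'] reads use getD "" (exact
-- under Pre_, which guarantees the "seq" key is present so Python raises no KeyError)
def pvAEntry (entry : List (String × String)) : List (String × String) :=
  let d0 := PySem.Dict.mk entry
  -- for non_alignment_char in " .N": entry['seq'] = entry['seq'].replace(c, '-')
  let d1 := (" .N".toList).foldl
    (fun d c => d.insert "seq" (PySem.Str.replace (d.getD "seq" "") (String.ofList [c]) "-")) d0
  -- for multi_char, replacement_list in non_standard_dict.items():
  --   entry['seq'] = entry['seq'].replace('N', replacement_list[0])   -- loop var leftover = 'N'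
  let d2 := pvNonStandardItems.foldl
    (fun d p => d.insert "seq" (PySem.Str.replace (d.getD "seq" "") "N" (p.2.headD ""))) d1
  d2.items

def remove_non_ACGT (alignment : List (List (String × String))) : List (List (String × String)) :=
  alignment.map pvAEntry

-- ===== PORT B =====
-- str.maketrans(" .N", "---") as an association table
def pvTable : List (Char × Char) := [(' ', '-'), ('.', '-'), ('N', '-')]

-- entry['seq'].translate(_TBL): one pass, chars absent from the table unchanged
def pvTranslate (cs : List Char) : List Char :=
  cs.map (fun c => ((pvTable.lookup c).getD c))

def pvBEntry (entry : List (String × String)) : List (String × String) :=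
  let d := PySem.Dict.mk entry
  (d.insert "seq" (String.ofList (pvTranslate (d.getD "seq" "").toList))).items

def remove_non_ACGT_alt (alignment : List (List (String × String))) : List (List (String × String)) :=
  alignment.map pvBEntry

-- ===== PRECONDITION & SPEC =====
-- Pre_ excludes exactly the entries without a "seq" key, on which Python A (and B) raise KeyError.
def Pre_remove_non_ACGT (alignment : List (List (String × String))) : Prop :=
  ∀ entry ∈ alignment, (PySem.Dict.mk entry).contains "seq" = true
instance (alignment : List (List (String × String))) : Decidable (Pre_remove_non_ACGT alignment) := by
  unfold Pre_remove_non_ACGT; infer_instance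

def pvWitness_remove_non_ACGT : (List (List (String × String))) :=
  [[("seq", "AC N.GRY"), ("species", "homo_sapiens")], [("seq", "")]]

def Spec_remove_non_ACGT (alignment : List (List (String × String))) (out : List (List (String × String))) : Prop := out = remove_non_ACGT_alt alignment
instance (alignment : List (List (String × String))) (out : List (List (String × String))) : Decidable (Spec_remove_non_ACGT alignment out) := by unfold Spec_remove_non_ACGT; infer_instance

-- ===== CLAIM (what is proved, stated in full; the proofs are below) =====
def Claim_equal_remove_non_ACGT : Prop := ∀ (alignment : List (List (String × String))), Dom_remove_non_ACGT alignment → Pre_remove_non_ACGT alignment → Spec_remove_non_ACGT alignment (remove_non_ACGT alignment)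

-- ===== LEMMAS AND PROOFS =====

-- single-char substitution: what one s.replace(a, b) with |a| = |b| = 1 does per char
def pvSub (a b c : Char) : Char := if c = a then b else c

-- replace with a single-char pattern and single-char replacement is a per-char map
lemma go_single (a b : Char) : ∀ (l : List Char) (fuel : Nat) (acc : List Char),
    l.length ≤ fuel →
    PySem.Chars.replace.go [a] [b] fuel l acc = acc.reverse ++ l.map (pvSub a b) := by
  intro l
  induction l with
  | nil =>
    intro fuel acc _
    cases fuel <;> simp [PySem.Chars.replace.go]
  | cons c t ih =>
    intro fuel acc h
    cases fuel with
    | zero => simp at h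
    | succ f =>
      simp only [PySem.Chars.replace.go, List.isPrefixOf, Bool.and_true,
        List.length_cons, List.length_nil, Nat.zero_add, List.drop_succ_cons,
        List.drop_zero] at *
      by_cases hc : a = c
      · subst hc
        simp only [BEq.rfl, if_true, List.reverse_singleton, List.singleton_append]
        rw [ih f (b :: acc) (by omega)]
        simp [pvSub]
      · have : (a == c) = false := by simp [hc]
        simp only [this, Bool.false_eq_true, if_false]
        rw [ih f (c :: acc) (by omega)]
        simp [pvSub, Ne.symm hc]

lemma replace_single (l : List Char) (a b : Char) :
    PySem.Chars.replace l [a] [b] = l.map (pvSub a b) := by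
  simp only [PySem.Chars.replace, List.isEmpty_cons, Bool.false_eq_true, if_false]
  simpa using go_single a b l l.length [] (le_refl _)

-- A's 13 substitutions composed equal B's table lookup, per character
lemma chain_char (c : Char) :
    pvSub 'N' 'A' (pvSub 'N' 'A' (pvSub 'N' 'A' (pvSub 'N' 'C' (pvSub 'N' 'A'
      (pvSub 'N' 'G' (pvSub 'N' 'A' (pvSub 'N' 'G' (pvSub 'N' 'C' (pvSub 'N' 'A'
      (pvSub 'N' '-' (pvSub '.' '-' (pvSub ' ' '-' c))))))))))))
    = (pvTable.lookup c).getD c := by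
  by_cases hc1 : c = ' '
  · subst hc1; decide
  by_cases hc2 : c = '.'
  · subst hc2; decide
  by_cases hc3 : c = 'N'
  · subst hc3; decide
  have hsp : pvSub ' ' '-' c = c := by simp [pvSub, hc1]
  have hdot : pvSub '.' '-' c = c := by simp [pvSub, hc2]
  have hN : ∀ b, pvSub 'N' b c = c := fun b => by simp [pvSub, hc3]
  rw [hsp, hdot]
  simp only [hN]
  have b1 : (c == ' ') = false := by simp [hc1]
  have b2 : (c == '.') = false := by simp [hc2]
  have b3 : (c == 'N') = false := by simp [hc3]
  simp [pvTable, List.lookup, b1, b2, b3]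

-- the same, lifted to whole character lists
lemma maps_eq (l : List Char) :
    List.map (pvSub 'N' 'A') (List.map (pvSub 'N' 'A') (List.map (pvSub 'N' 'A')
      (List.map (pvSub 'N' 'C') (List.map (pvSub 'N' 'A') (List.map (pvSub 'N' 'G')
      (List.map (pvSub 'N' 'A') (List.map (pvSub 'N' 'G') (List.map (pvSub 'N' 'C')
      (List.map (pvSub 'N' 'A') (List.map (pvSub 'N' '-') (List.map (pvSub '.' '-')
      (List.map (pvSub ' ' '-') l))))))))))))
    = pvTranslate l := by
  induction l with
  | nil => rfl
  | cons c t ih =>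
    simp only [pvTranslate, List.map_cons] at ih ⊢
    exact congrArg₂ List.cons (chain_char c) ih

set_option maxHeartbeats 1000000 in
lemma entry_eq (e : List (String × String)) : pvAEntry e = pvBEntry e := by
  have hchars : (" .N" : String).toList = [' ', '.', 'N'] := rfl
  have hof : ∀ l : List Char, (String.ofList l).toList = l := by
    intro l; exact String.toList_ofList
  simp only [pvAEntry, pvBEntry, pvNonStandardItems, hchars,
    List.foldl_cons, List.foldl_nil, List.headD_cons,
    PySem.Dict.getD_insert_self, PySem.Dict.insert_insert_self]
  apply congrArg PySem.Dict.items
  apply congrArg (PySem.Dict.insert (PySem.Dict.mk e) "seq")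
  apply String.toList_inj.mp
  simp only [PySem.Str.toList_replace, hof, replace_single]
  exact maps_eq _

-- ===== VERDICT (by name: the statement is the Claim_ definition above) =====
theorem remove_non_ACGT_spec : Claim_equal_remove_non_ACGT := by
  intro alignment _ _
  unfold Spec_remove_non_ACGT
  simp only [remove_non_ACGT, remove_non_ACGT_alt]
  exact List.map_congr_left (fun e _ => entry_eq e)
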